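-- pv_equiv track=rewrite | github.com/Benjamin-V-Chan/statistical-simulation-optimal-stopping | scripts/05_other_strategies_hist.py | resolve_hist_range
-- ===== SOURCE A (Python) =====
-- def resolve_hist_range(results, range_min, range_max):
--     if range_min is not None and range_max is not None:
--         return range_min, range_max
--     values = []
--     for values_list in results.values():
--         values.extend(values_list)
--     if not values:
--         raise ValueError("No results to plot.")
--     data_min = min(values)
--     data_max = max(values)
--     return (
--         data_min if range_min is None else range_min,
--         data_max if range_max is None else range_max,
--     )
-- ===== SOURCE B (Python) =====
-- def resolve_hist_range(results, range_min, range_max):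
--     if range_min is not None and range_max is not None:
--         return range_min, range_max
--     state = None
--     for values_list in results.values():
--         for v in values_list:
--             if state is None:
--                 state = (v, v)
--             else:
--                 lo, hi = state
--                 state = (v if v < lo else lo, v if v > hi else hi)
--     if state is None:
--         raise ValueError("No results to plot.")
--     lo, hi = state
--     return (
--         lo if range_min is None else range_min,
--         hi if range_max is None else range_max,
--     )
-- ===== Notes on version B (the rewrite author's own statement) =====
-- stated objective: alternative
-- what changed: B replaces A's materialised flattened values list followed by separate min() and max() passes by a single nested-loop pass that maintains an optional running (lo, hi) pair; no intermediate list is built.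
import Mathlib
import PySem

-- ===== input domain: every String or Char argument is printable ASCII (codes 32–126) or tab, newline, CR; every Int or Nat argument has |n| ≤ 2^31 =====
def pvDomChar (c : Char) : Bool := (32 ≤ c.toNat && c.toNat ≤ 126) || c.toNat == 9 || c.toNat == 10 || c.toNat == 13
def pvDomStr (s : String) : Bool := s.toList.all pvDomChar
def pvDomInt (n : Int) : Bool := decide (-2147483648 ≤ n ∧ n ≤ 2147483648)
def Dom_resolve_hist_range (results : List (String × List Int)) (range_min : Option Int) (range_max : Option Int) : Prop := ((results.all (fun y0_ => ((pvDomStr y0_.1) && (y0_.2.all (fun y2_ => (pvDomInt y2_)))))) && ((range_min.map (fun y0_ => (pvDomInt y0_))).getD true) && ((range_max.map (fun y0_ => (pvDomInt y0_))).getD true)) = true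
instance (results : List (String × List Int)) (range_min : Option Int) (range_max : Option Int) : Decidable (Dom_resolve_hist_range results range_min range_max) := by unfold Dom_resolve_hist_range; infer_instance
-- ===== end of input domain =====

-- B replaces A's flattened list + separate min()/max() passes by a single nested-loop pass
-- maintaining an optional running (lo, hi) pair (alternative decomposition, O(1) extra space).


-- ===== PORT A =====
def resolve_hist_range (results : List (String × List Int)) (range_min : Option Int) (range_max : Option Int) : Int × Int :=
  match range_min, range_max with
  | some a, some b => (a, b)                                 -- early return: both bounds given
  | _, _ =>
    -- values = []; for values_list in results.values(): values.extend(values_list)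
    let values := results.foldl (fun acc p => acc ++ p.2) []
    -- 'if not values: raise ValueError(...)' — excluded by Pre_; min/max of empty default 0 is never used under Pre_
    let data_min := (PySem.List.min? values (fun y => y)).getD 0
    let data_max := (PySem.List.max? values (fun y => y)).getD 0
    (range_min.getD data_min, range_max.getD data_max)

-- ===== PORT B =====
-- one step of B's running-extrema loop: None → (v, v); (lo, hi) → (min, max) update
def histStep (st : Option (Int × Int)) (v : Int) : Option (Int × Int) :=
  match st with
  | none => some (v, v)
  | some (lo, hi) => some ((if v < lo then v else lo), (if v > hi then v else hi))

def resolve_hist_range_alt (results : List (String × List Int)) (range_min : Option Int) (range_max : Option Int) : Int × Int :=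
  if h : range_min.isSome ∧ range_max.isSome then
    (range_min.get h.1, range_max.get h.2)   -- early return: both bounds given
  else
    let st := results.foldl (fun s p => p.2.foldl histStep s) none
    match st with
    | none => (0, 0)                                         -- 'raise ValueError(...)' in Source B — excluded by Pre_
    | some (lo, hi) => (range_min.getD lo, range_max.getD hi)

-- ===== PRECONDITION & SPEC =====
-- Pre_ excludes exactly the inputs on which A raises ValueError("No results to plot."):
-- some histogram bound is missing and every results list is empty.
def Pre_resolve_hist_range (results : List (String × List Int)) (range_min : Option Int) (range_max : Option Int) : Prop :=
  (range_min.isSome = true ∧ range_max.isSome = true) ∨ results.any (fun p => !p.2.isEmpty) = true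
instance (results : List (String × List Int)) (range_min : Option Int) (range_max : Option Int) : Decidable (Pre_resolve_hist_range results range_min range_max) := by unfold Pre_resolve_hist_range; infer_instance

def pvWitness_resolve_hist_range : (List (String × List Int)) × Option Int × Option Int := ([("greedy", [3, -1, 7])], none, some 10)

def Spec_resolve_hist_range (results : List (String × List Int)) (range_min : Option Int) (range_max : Option Int) (out : Int × Int) : Prop := out = resolve_hist_range_alt results range_min range_max
instance (results : List (String × List Int)) (range_min : Option Int) (range_max : Option Int) (out : Int × Int) : Decidable (Spec_resolve_hist_range results range_min range_max out) := by unfold Spec_resolve_hist_range; infer_instance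

-- ===== CLAIM (what is proved, stated in full; the proofs are below) =====
def Claim_equal_resolve_hist_range : Prop := ∀ (results : List (String × List Int)) (range_min : Option Int) (range_max : Option Int), Dom_resolve_hist_range results range_min range_max → Pre_resolve_hist_range results range_min range_max → Spec_resolve_hist_range results range_min range_max (resolve_hist_range results range_min range_max)

-- ===== LEMMAS AND PROOFS =====

-- B's step on a populated state is the running min/max pair
theorem foldl_histStep_some (xs : List Int) (lo hi : Int) :
    xs.foldl histStep (some (lo, hi)) = some (xs.foldl min lo, xs.foldl max hi) := by
  induction xs generalizing lo hi with
  | nil => rfl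
  | cons v t ih =>
    simp only [List.foldl_cons, histStep]
    rw [show (if v < lo then v else lo) = min lo v by omega,
        show (if v > hi then v else hi) = max hi v by omega, ih]

-- B's whole nested loop equals the fold of histStep over the flattened values
theorem foldl_nested_histStep (results : List (String × List Int)) (s : Option (Int × Int)) :
    results.foldl (fun s p => p.2.foldl histStep s) s
      = (results.flatMap (fun p => p.2)).foldl histStep s := by
  induction results generalizing s with
  | nil => rfl
  | cons p t ih => simp [List.foldl_append, ih]

theorem flatMap_ne_nil_of_any (results : List (String × List Int))
    (h : results.any (fun p => !p.2.isEmpty) = true) :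
    results.flatMap (fun p => p.2) ≠ [] := by
  simp only [List.any_eq_true] at h
  obtain ⟨p, hp, hne⟩ := h
  have hne' : p.2 ≠ [] := by simpa [List.isEmpty_iff] using hne
  intro hflat
  exact hne' (List.flatMap_eq_nil_iff.mp hflat p hp)

-- on an input with some nonempty values list, B's loop state and A's min/max coincide
theorem vals_eq (results : List (String × List Int))
    (h : results.any (fun p => !p.2.isEmpty) = true) :
    ∃ lo hi,
      results.foldl (fun s p => p.2.foldl histStep s) none = some (lo, hi)
      ∧ (PySem.List.min? (results.foldl (fun acc p => acc ++ p.2) []) (fun y => y)).getD 0 = lo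
      ∧ (PySem.List.max? (results.foldl (fun acc p => acc ++ p.2) []) (fun y => y)).getD 0 = hi := by
  have hvals : results.foldl (fun acc p => acc ++ p.2) []
      = results.flatMap (fun p => p.2) := by
    simpa using PySem.List.foldl_append_eq_flatMap (fun p => p.2) (l := results) (acc := [])
  rcases hv : results.flatMap (fun p => p.2) with _ | ⟨v, t⟩
  · exact absurd hv (flatMap_ne_nil_of_any results h)
  · refine ⟨t.foldl min v, t.foldl max v, ?_, ?_, ?_⟩
    · rw [foldl_nested_histStep, hv]
      simp only [List.foldl_cons, histStep]
      exact foldl_histStep_some t v v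
    · rw [hvals, hv, PySem.List.min?_id_cons, Option.getD_some]
    · rw [hvals, hv, PySem.List.max?_id_cons, Option.getD_some]

-- the core: the two programs compute the same pair on every admitted input
theorem resolve_agree (results : List (String × List Int)) (range_min range_max : Option Int)
    (hpre : Pre_resolve_hist_range results range_min range_max) :
    resolve_hist_range results range_min range_max
      = resolve_hist_range_alt results range_min range_max := by
  rcases range_min with _ | a <;> rcases range_max with _ | b
  case some.some => simp [resolve_hist_range, resolve_hist_range_alt]
  all_goals
    have hany : results.any (fun p => !p.2.isEmpty) = true := by
      rcases hpre with ⟨h1, h2⟩ | h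
      · simp at h1 h2
      · exact h
  all_goals
    obtain ⟨lo, hi, h1, h2, h3⟩ := vals_eq results hany
    simp only [resolve_hist_range, resolve_hist_range_alt, h1, h2, h3, Option.getD_some,
      Option.getD_none, Option.isSome_none, Option.isSome_some, false_and, and_false,
      dite_false, Bool.false_eq_true]

-- ===== VERDICT (by name: the statement is the Claim_ definition above) =====
theorem resolve_hist_range_spec : Claim_equal_resolve_hist_range := by
  intro results rm rx _ hpre
  unfold Spec_resolve_hist_range
  exact resolve_agree results rm rx hpre
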